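-- pv_equiv track=rewrite | github.com/drgriffis/SBD-Evaluation | code/preprocessing/genia/plaintext.py | calculateBounds
-- ===== SOURCE A (Python) =====
-- def calculateBounds(sentences):
--     """Given a list of sentence strings, calculate their bounds as character offsets from 0
--     """
--     curbound, bounds = 0, []
--     for s in sentences:
--         bounds.append((curbound, curbound + len(s)))
--         curbound += len(s) + 1
--     commabounds = [','.join((str(b) for b in bnds)) for bnds in bounds]
--     strbounds = '\n'.join(commabounds)
--     return strbounds
-- ===== SOURCE B (Python) =====
-- def calculateBounds(sentences):
--     """Given a list of sentence strings, calculate their bounds as character offsets from 0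
--     """
--     if not sentences:
--         return ''
--     # Materialise the document the offsets describe: sentences joined by one
--     # separator character (NUL, which cannot occur in the text), then read the
--     # bounds straight off the separator positions instead of accumulating lengths.
--     doc = '\x00'.join(sentences)
--     seps = [i for i, c in enumerate(doc) if c == '\x00']
--     starts = [0] + [p + 1 for p in seps]
--     ends = seps + [len(doc)]
--     return '\n'.join('%d,%d' % (a, b) for a, b in zip(starts, ends))
-- ===== Notes on version B (the rewrite author's own statement) =====
-- stated objective: alternative
-- what changed: Instead of accumulating a running offset over the sentences, B materialises the separator-joined document ('\x00'.join, NUL cannot occur in the text), reads the separator positions off the document with one enumerate scan, and derives starts/ends lists from those positions before zipping and formatting; A threads a counter while appending (start,end) tuples.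
import Mathlib
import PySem

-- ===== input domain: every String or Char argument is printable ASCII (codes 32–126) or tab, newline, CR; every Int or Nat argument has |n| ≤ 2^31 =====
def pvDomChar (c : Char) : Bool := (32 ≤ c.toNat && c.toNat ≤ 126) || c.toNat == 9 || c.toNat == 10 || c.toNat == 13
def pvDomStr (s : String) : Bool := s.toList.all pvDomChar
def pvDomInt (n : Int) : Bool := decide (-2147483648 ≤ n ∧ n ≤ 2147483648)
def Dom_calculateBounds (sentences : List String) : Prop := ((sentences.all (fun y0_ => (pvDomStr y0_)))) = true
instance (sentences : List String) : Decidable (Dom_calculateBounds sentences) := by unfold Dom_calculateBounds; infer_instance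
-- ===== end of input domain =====

-- B materialises the separator-joined document and reads the bounds off the separator positions instead of accumulating lengths; same O(n), an alternative algorithm.


-- ===== PORT A =====
def calculateBounds (sentences : List String) : String :=
  let st := sentences.foldl
    (fun (st : Int × List (Int × Int)) s =>
      (st.1 + PySem.Str.len s + 1, st.2 ++ [(st.1, st.1 + PySem.Str.len s)]))
    ((0 : Int), ([] : List (Int × Int)))
  let commabounds := st.2.map (fun bnds => PySem.Str.join "," [PySem.Int.toStr bnds.1, PySem.Int.toStr bnds.2])
  PySem.Str.join "\n" commabounds

-- ===== PORT B =====
def calculateBounds_alt (sentences : List String) : String :=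
  if sentences = [] then "" else
  let doc := PySem.Str.join "\x00" sentences
  -- [i for i, c in enumerate(doc) if c == '\x00'] : a filtering comprehension over enumerate
  let seps := (PySem.List.enumerate doc.toList 0).filterMap
    (fun ic => if ic.2 = '\x00' then some ic.1 else none)
  let starts := (0 : Int) :: seps.map (· + 1)
  let ends := seps ++ [PySem.Str.len doc]
  PySem.Str.join "\n"
    ((starts.zip ends).map (fun p => PySem.Int.toStr p.1 ++ "," ++ PySem.Int.toStr p.2))

-- ===== PRECONDITION & SPEC =====
def Spec_calculateBounds (sentences : List String) (out : String) : Prop := out = calculateBounds_alt sentences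
instance (sentences : List String) (out : String) : Decidable (Spec_calculateBounds sentences out) := by unfold Spec_calculateBounds; infer_instance

-- ===== CLAIM (what is proved, stated in full; the proofs are below) =====
def Claim_equal_calculateBounds : Prop := ∀ (sentences : List String), Dom_calculateBounds sentences → Spec_calculateBounds sentences (calculateBounds sentences)

-- ===== LEMMAS AND PROOFS =====

/-- The (start, end) pairs A accumulates, starting at offset `cb`. -/
def pvPairs : List String → Int → List (Int × Int)
  | [], _ => []
  | s :: r, cb => (cb, cb + PySem.Str.len s) :: pvPairs r (cb + PySem.Str.len s + 1)

/-- Positions (offset by `b`) of the NUL separator in a character list. -/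
def pvSepPos : List Char → Int → List Int
  | [], _ => []
  | c :: r, b => if c = '\x00' then b :: pvSepPos r (b + 1) else pvSepPos r (b + 1)

/-- Separator positions of the NUL-joined document of `l`, starting at offset `cb`. -/
def pvSeps : List String → Int → List Int
  | [], _ => []
  | [_], _ => []
  | s :: r, cb => (cb + PySem.Str.len s) :: pvSeps r (cb + PySem.Str.len s + 1)

/-- Length of the NUL-joined document of `l`. -/
def pvDocLen : List String → Int
  | [] => 0
  | [s] => PySem.Str.len s
  | s :: r => PySem.Str.len s + 1 + pvDocLen r

theorem pvA_loop (l : List String) : ∀ (cb : Int) (bs : List (Int × Int)),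
    (l.foldl (fun (st : Int × List (Int × Int)) s =>
        (st.1 + PySem.Str.len s + 1, st.2 ++ [(st.1, st.1 + PySem.Str.len s)])) (cb, bs)).2
      = bs ++ pvPairs l cb := by
  induction l with
  | nil => intro cb bs; simp [pvPairs]
  | cons s r ih => intro cb bs; simp only [List.foldl]; rw [ih]; simp [pvPairs]

theorem pvJoin_pair (x y : String) : PySem.Str.join "," [x, y] = x ++ "," ++ y := by
  apply String.toList_injective
  simp [PySem.Str.join, PySem.Chars.join, List.intercalate]

theorem pvEnum_filter (cs : List Char) : ∀ (b : Int),
    (PySem.List.enumerate cs b).filterMap (fun ic => if ic.2 = '\x00' then some ic.1 else none)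
      = pvSepPos cs b := by
  induction cs with
  | nil => intro b; simp [pvSepPos, PySem.List.enumerate_nil]
  | cons c r ih =>
    intro b
    rw [PySem.List.enumerate_cons]
    by_cases h : c = '\x00' <;> simp [pvSepPos, h, ih]

theorem pvSepPos_append (a b : List Char) : ∀ (base : Int),
    pvSepPos (a ++ b) base = pvSepPos a base ++ pvSepPos b (base + a.length) := by
  induction a with
  | nil => intro base; simp [pvSepPos]
  | cons c t ih =>
    intro base
    have : base + 1 + (t.length : Int) = base + ((c :: t).length : Int) := by
      simp; ring
    by_cases h : c = '\x00' <;> simp [pvSepPos, h, ih, this]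

theorem pvSepPos_dom (cs : List Char) (hs : cs.all pvDomChar = true) : ∀ (b : Int),
    pvSepPos cs b = [] := by
  induction cs with
  | nil => intro b; rfl
  | cons c t ih =>
    intro b
    simp only [List.all_cons, Bool.and_eq_true] at hs
    have hc : c ≠ '\x00' := by
      intro h; subst h; exact absurd hs.1 (by decide)
    simp [pvSepPos, hc, ih hs.2]

theorem pvDocSep (l : List String) (hd : l.all pvDomStr = true) (hne : l ≠ []) : ∀ (cb : Int),
    pvSepPos (PySem.Chars.join ['\x00'] (l.map String.toList)) cb = pvSeps l cb := by
  induction l with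
  | nil => exact absurd rfl hne
  | cons s r ih =>
    intro cb
    simp only [List.all_cons, Bool.and_eq_true] at hd
    cases r with
    | nil =>
      simp only [List.map, PySem.Chars.join_singleton]
      exact (pvSepPos_dom s.toList hd.1 cb).trans rfl
    | cons t u =>
      simp only [List.map, PySem.Chars.join_cons_cons, List.append_assoc]
      rw [pvSepPos_append, pvSepPos_dom s.toList hd.1]
      have hih := ih hd.2 (by simp) (cb + (s.toList.length : Int) + 1)
      simp only [List.map] at hih
      simp only [List.nil_append, List.singleton_append, pvSepPos, if_true, hih]
      simp [pvSeps, PySem.Str.len_eq]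

theorem pvDocLen_eq (l : List String) (hne : l ≠ []) :
    ((PySem.Chars.join ['\x00'] (l.map String.toList)).length : Int) = pvDocLen l := by
  induction l with
  | nil => exact absurd rfl hne
  | cons s r ih =>
    cases r with
    | nil => simp [PySem.Chars.join_singleton, pvDocLen, PySem.Str.len_eq]
    | cons t u =>
      simp only [List.map, PySem.Chars.join_cons_cons, List.append_assoc]
      have := ih (by simp)
      simp only [List.map] at this
      simp only [pvDocLen, PySem.Str.len_eq, List.length_append, List.length_singleton]
      push_cast [← this]
      ring

theorem pvZip (l : List String) (hne : l ≠ []) : ∀ (cb : Int),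
    ((cb :: (pvSeps l cb).map (· + 1)).zip (pvSeps l cb ++ [cb + pvDocLen l])) = pvPairs l cb := by
  induction l with
  | nil => exact absurd rfl hne
  | cons s r ih =>
    intro cb
    cases r with
    | nil => simp [pvSeps, pvDocLen, pvPairs, PySem.Str.len_eq]
    | cons t u =>
      simp only [pvSeps, pvDocLen, pvPairs, List.map, List.zip_cons_cons, List.cons_append]
      rw [show cb + (PySem.Str.len s + 1 + pvDocLen (t :: u))
            = (cb + PySem.Str.len s + 1) + pvDocLen (t :: u) by ring]
      rw [ih (by simp) (cb + PySem.Str.len s + 1)]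
      simp [pvPairs]

-- ===== VERDICT (by name: the statement is the Claim_ definition above) =====
theorem calculateBounds_spec : Claim_equal_calculateBounds := by
  intro sentences hd
  simp only [Spec_calculateBounds, calculateBounds, calculateBounds_alt]
  by_cases hne : sentences = []
  · subst hne; rfl
  · rw [if_neg hne, pvA_loop sentences 0 [], List.nil_append]
    rw [PySem.Str.toList_join, pvEnum_filter,
        show ("\x00".toList) = ['\x00'] from rfl, pvDocSep sentences hd hne 0]
    have hlen : PySem.Str.len (PySem.Str.join "\x00" sentences) = 0 + pvDocLen sentences := by
      rw [PySem.Str.len_eq, PySem.Str.toList_join,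
          show ("\x00".toList) = ['\x00'] from rfl, pvDocLen_eq sentences hne, zero_add]
    rw [hlen, pvZip sentences hne 0]
    congr 1
    apply List.map_congr_left
    intro p _
    rw [pvJoin_pair]
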